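-- pv_equiv track=rewrite | github.com/a2bradjan/binary_search | binary_search.py | find_smallest_positive
-- ===== SOURCE A (Python) =====
-- def find_smallest_positive(xs):
--     '''
--     Assume that xs is a list of numbers sorted from LOWEST to HIGHEST.
--     Find the index of the smallest positive number.
--     If no such index exists, return `None`.
--
--     HINT:
--     This is essentially the binary search algorithm from class,
--     but you're always searching for 0.
--
--     >>> find_smallest_positive([-3, -2, -1, 0, 1, 2, 3])
--     4
--     >>> find_smallest_positive([1, 2, 3])
--     0
--     >>> find_smallest_positive([-3, -2, -1]) is None
--     True
--     '''
--     mid = len(xs)//2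
--     if len(xs)==0:
--         return None
--     elif xs[mid]==0:
--         return mid+1
--     elif 0>xs[mid]:
--         leng = len(xs)
--         if leng==1:
--             return None
--         else:
--             x = mid+1
--             count = find_smallest_positive(xs[x:])
--             if count == None:
--                 return None
--             else:
--                 return mid+1+count
--     else:
--         if len(xs)==1:
--             return 0
--         else:
--             if find_smallest_positive(xs[:mid])==None:
--                 return mid
--             else:
--                 return find_smallest_positive(xs[:mid])
-- ===== SOURCE B (Python) =====
-- def find_smallest_positive(xs):
--     '''Iterative binary search over [lo, hi) with a fallback answer, no slicing/recursion.'''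
--     lo, hi = 0, len(xs)
--     ans = None
--     while lo < hi:
--         mid = lo + (hi - lo) // 2
--         v = xs[mid]
--         if v == 0:
--             return mid + 1
--         elif v < 0:
--             lo = mid + 1
--         else:
--             ans = mid
--             hi = mid
--     return ans
-- ===== Notes on version B (the rewrite author's own statement) =====
-- stated objective: idiomatic
-- what changed: Replaced A's recursion that builds list slices (xs[mid+1:], xs[:mid]) and re-offsets the result with an iterative binary search over index bounds lo/hi carrying a fallback answer, with no slicing and no double recursive call.
import Mathlib
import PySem

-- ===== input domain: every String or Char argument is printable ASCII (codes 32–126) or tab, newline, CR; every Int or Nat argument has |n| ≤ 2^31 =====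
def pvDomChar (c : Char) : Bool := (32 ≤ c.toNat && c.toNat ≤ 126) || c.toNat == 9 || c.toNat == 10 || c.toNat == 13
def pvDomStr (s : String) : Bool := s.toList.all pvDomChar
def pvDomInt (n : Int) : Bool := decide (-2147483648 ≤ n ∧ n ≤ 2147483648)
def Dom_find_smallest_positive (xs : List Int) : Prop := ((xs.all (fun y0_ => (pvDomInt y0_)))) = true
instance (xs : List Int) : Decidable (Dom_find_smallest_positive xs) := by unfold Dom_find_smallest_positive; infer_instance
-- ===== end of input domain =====

-- B changes the recursive, list-slicing search of A into an iterative (tail-recursive) binary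
-- search over index bounds with a fallback answer: no slices are built (objective: idiomatic).

-- needed by the ports' termination proofs (cited in decreasing_by)
theorem pv_fdiv2 (n : Nat) : PySem.Int.floordiv (n : Int) 2 = ((n / 2 : Nat) : Int) := by
  exact_mod_cast PySem.Int.floordiv_natCast n 2

-- ===== PORT A =====
def find_smallest_positive (xs : List Int) : Option Int :=
  let mid : Int := PySem.Int.floordiv (xs.length : Int) 2
  if _h0 : xs.length = 0 then none
  else
    match PySem.List.pyGet? xs mid with
    | none => none  -- unreachable: 0 ≤ mid < len(xs)
    | some v =>
      if v = 0 then some (mid + 1)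
      else if 0 > v then
        if xs.length = 1 then none
        else
          let x := mid + 1
          match find_smallest_positive (PySem.List.slice xs (some x) none) with
          | none => none
          | some count => some (mid + 1 + count)
      else
        if xs.length = 1 then some 0
        else
          -- Python tests `find_smallest_positive(xs[:mid]) == None` and, if not None,
          -- calls it a second time to return it
          match find_smallest_positive (PySem.List.slice xs none (some mid)) with
          | none => some mid
          | some _ => find_smallest_positive (PySem.List.slice xs none (some mid))
termination_by xs.length
decreasing_by
  · rw [pv_fdiv2, PySem.List.slice_from xs (by positivity)]
    simp only [List.length_drop]
    omega
  all_goals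
    rw [pv_fdiv2, PySem.List.slice_to xs (by positivity)]
    simp only [List.length_take]
    omega

-- ===== PORT B =====
def fspLoop (xs : List Int) (lo hi : Nat) (ans : Option Int) : Option Int :=
  if _h : lo < hi then
    let mid := lo + (hi - lo) / 2
    match xs[mid]? with
    | none => ans  -- unreachable while hi ≤ len(xs)
    | some v =>
      if v = 0 then some ((mid : Int) + 1)
      else if v < 0 then fspLoop xs (mid + 1) hi ans
      else fspLoop xs lo mid (some (mid : Int))
  else ans
termination_by hi - lo
decreasing_by all_goals omega

def find_smallest_positive_alt (xs : List Int) : Option Int :=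
  fspLoop xs 0 xs.length none

-- ===== PRECONDITION & SPEC =====
def Spec_find_smallest_positive (xs : List Int) (out : Option Int) : Prop := out = find_smallest_positive_alt xs
instance (xs : List Int) (out : Option Int) : Decidable (Spec_find_smallest_positive xs out) := by unfold Spec_find_smallest_positive; infer_instance

-- ===== CLAIM (what is proved, stated in full; the proofs are below) =====
def Claim_equal_find_smallest_positive : Prop := ∀ (xs : List Int), Dom_find_smallest_positive xs → Spec_find_smallest_positive xs (find_smallest_positive xs)

-- ===== LEMMAS AND PROOFS =====

-- The loop on the window [lo, hi) computes A's answer on the segment, shifted by lo,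
-- with `ans` as the fallback for A's None.
theorem fspLoop_eq_aux (xs : List Int) (fuel : Nat) :
    ∀ (lo hi : Nat) (ans : Option Int), hi - lo ≤ fuel → hi ≤ xs.length →
    fspLoop xs lo hi ans =
      match find_smallest_positive ((xs.drop lo).take (hi - lo)) with
      | none => ans
      | some k => some (k + (lo : Int)) := by
  induction fuel with
  | zero =>
    intro lo hi ans hf hhi
    rw [fspLoop, dif_neg (by omega)]
    have h0 : hi - lo = 0 := by omega
    rw [h0]
    simp [find_smallest_positive]
  | succ m ih =>
    intro lo hi ans hf hhi
    by_cases h : lo < hi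
    · have hmidlt : lo + (hi - lo) / 2 < xs.length := by omega
      obtain ⟨v, hv⟩ : ∃ v, xs[lo + (hi - lo) / 2]? = some v :=
        ⟨_, List.getElem?_eq_getElem hmidlt⟩
      have hs_len : ((xs.drop lo).take (hi - lo)).length = hi - lo := by
        simp [List.length_take, List.length_drop]; omega
      have hseg_get : PySem.List.pyGet? ((xs.drop lo).take (hi - lo))
          (((hi - lo) / 2 : Nat) : Int) = some v := by
        rw [PySem.List.pyGet?_natCast, List.getElem?_take_of_lt (by omega), List.getElem?_drop, hv]
      rw [fspLoop, dif_pos h]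
      simp only [hv]
      rw [find_smallest_positive]
      simp only [hs_len, pv_fdiv2, hseg_get]
      rw [dif_neg (by omega : ¬ hi - lo = 0)]
      rcases lt_trichotomy v 0 with hvlt | hveq | hvgt
      · -- v < 0 : go right
        rw [if_neg (by omega), if_pos (by omega), if_neg (by omega), if_pos hvlt]
        by_cases h1 : hi - lo = 1
        · rw [if_pos h1]
          rw [ih (lo + (hi - lo) / 2 + 1) hi ans (by omega) hhi]
          rw [show hi - (lo + (hi - lo) / 2 + 1) = 0 from by omega]
          simp [find_smallest_positive]
        · rw [if_neg h1]
          rw [show (((hi - lo) / 2 : Nat) : Int) + 1 = (((hi - lo) / 2 + 1 : Nat) : Int) from by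
            push_cast; ring]
          rw [PySem.List.slice_from _ (by positivity), Int.toNat_natCast]
          rw [show ((xs.drop lo).take (hi - lo)).drop ((hi - lo) / 2 + 1)
              = (xs.drop (lo + (hi - lo) / 2 + 1)).take (hi - (lo + (hi - lo) / 2 + 1)) from by
            rw [List.drop_take, List.drop_drop,
              show hi - lo - ((hi - lo) / 2 + 1) = hi - (lo + (hi - lo) / 2 + 1) from by omega,
              show lo + ((hi - lo) / 2 + 1) = lo + (hi - lo) / 2 + 1 from by omega]]
          rw [ih (lo + (hi - lo) / 2 + 1) hi ans (by omega) hhi]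
          cases hA : find_smallest_positive
              ((xs.drop (lo + (hi - lo) / 2 + 1)).take (hi - (lo + (hi - lo) / 2 + 1))) with
          | none => rfl
          | some c =>
            simp only [Option.some.injEq]
            push_cast
            omega
      · -- v = 0 : immediate return mid + 1
        rw [if_pos hveq, if_pos hveq]
        simp only [Option.some.injEq]
        push_cast
        omega
      · -- v > 0 : go left, record mid
        rw [if_neg (by omega), if_neg (by omega), if_neg (by omega), if_neg (by omega)]
        rw [ih lo (lo + (hi - lo) / 2) (some ((lo + (hi - lo) / 2 : Nat) : Int)) (by omega) (by omega)]
        rw [show lo + (hi - lo) / 2 - lo = (hi - lo) / 2 from by omega]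
        by_cases h1 : hi - lo = 1
        · rw [if_pos h1]
          rw [show (hi - lo) / 2 = 0 from by omega]
          simp only [List.take_zero]
          rw [show find_smallest_positive ([] : List Int) = none from by
            simp [find_smallest_positive]]
          simp only [Option.some.injEq]
          omega
        · rw [if_neg h1]
          rw [PySem.List.slice_to _ (by positivity), Int.toNat_natCast]
          rw [List.take_take, show min ((hi - lo) / 2) (hi - lo) = (hi - lo) / 2 from by omega]
          cases hA : find_smallest_positive ((xs.drop lo).take ((hi - lo) / 2)) with
          | none =>
            simp only [Option.some.injEq]
            push_cast
            omega
          | some c => rfl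
    · rw [fspLoop, dif_neg h]
      have h0 : hi - lo = 0 := by omega
      rw [h0]
      simp [find_smallest_positive]

theorem fspLoop_eq (xs : List Int) (lo hi : Nat) (ans : Option Int)
    (hhi : hi ≤ xs.length) :
    fspLoop xs lo hi ans =
      match find_smallest_positive ((xs.drop lo).take (hi - lo)) with
      | none => ans
      | some k => some (k + (lo : Int)) :=
  fspLoop_eq_aux xs (hi - lo) lo hi ans (le_refl _) hhi

theorem find_smallest_positive_spec : Claim_equal_find_smallest_positive := by
  intro xs _
  unfold Spec_find_smallest_positive find_smallest_positive_alt
  rw [fspLoop_eq xs 0 xs.length none (le_refl _)]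
  simp only [List.drop_zero, Nat.sub_zero, List.take_length]
  cases find_smallest_positive xs <;> simp
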